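-- pv_equiv track=rewrite | github.com/pawelzar/python-ai-cleaner | src/core/algorithm.py | path_as_orders
-- ===== SOURCE A (Python) =====
-- def count_cost(start, goal, state):
--     """
--     Return cost of agent move, including rotations.
--     """
--     (x, y) = start
--     (x_next, y_next) = goal
--     new_state = state
--     cost = 0
--
--     if state == 'up':  # 0 degrees (UP)
--         if y_next < y:
--             pass
--         elif y_next > y:
--             new_state = 'down'
--             cost = 2
--         elif x_next < x:
--             new_state = 'left'
--             cost = -1
--         elif x_next > x:
--             new_state = 'right'
--             cost = 1
--     elif state == 'right':  # 90 degrees (RIGHT)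
--         if y_next < y:
--             new_state = 'up'
--             cost = -1
--         elif y_next > y:
--             new_state = 'down'
--             cost = 1
--         elif x_next < x:
--             new_state = 'left'
--             cost = 2
--         elif x_next > x:
--             pass
--     elif state == 'down':  # 180 degrees (DOWN)
--         if y_next < y:
--             new_state = 'up'
--             cost = 2
--         elif y_next > y:
--             pass
--         elif x_next < x:
--             new_state = 'left'
--             cost = 1
--         elif x_next > x:
--             new_state = 'right'
--             cost = -1
--     elif state == 'left':  # 270 degrees (LEFT)
--         if y_next < y:
--             new_state = 'up'
--             cost = 1
--         elif y_next > y: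
--             new_state = 'down'
--             cost = -1
--         elif x_next < x:
--             pass
--         elif x_next > x:
--             new_state = 'right'
--             cost = 2
--
--     return new_state, cost
--
-- def path_as_orders(path, rotation=0):
--     """
--     Return list of move directions for the agent.
--     """
--     # state = {0: 'up', 90: 'right', 180: 'down', -90: 'left'}.get(rotation)
--     state = 'up'
--     states = []
--     rotations = []
--     (x_prev, y_prev) = path[0]
--
--     for x, y in path[1:]:
--         state, cost = count_cost((x_prev, y_prev), (x, y), state)
--
--         if cost == -1:
--             states.append('turn left')
--         elif cost > 0:
--             states.extend(['turn right'] * cost)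
--
--         states.append('straight')
--         rotations.append(cost)
--         (x_prev, y_prev) = (x, y)
--
--     return states
-- ===== SOURCE B (Python) =====
-- TURNS = {0: [], 1: ['turn right'], 2: ['turn right', 'turn right'], 3: ['turn left']}
--
--
-- def step_direction(p, q):
--     """Direction index of the move p -> q (up=0,right=1,down=2,left=3), None if no move."""
--     (px, py), (x, y) = p, q
--     if y < py:
--         return 0
--     if y > py:
--         return 2
--     if x < px:
--         return 3
--     if x > px:
--         return 1
--     return None
--
--
-- def path_as_orders(path, rotation=0):
--     """Three staged passes instead of one stateful loop with a branch table:
--     (1) map consecutive pairs to direction indices, (2) scan filling 'no move'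
--     steps with the previous heading, (3) table-driven expansion of heading
--     differences into turn/straight tokens."""
--     raw = [step_direction(p, q) for p, q in zip(path, path[1:])]
--     headings = []
--     h = 0
--     for t in raw:
--         h = h if t is None else t
--         headings.append(h)
--     out = []
--     for d, t in zip([0] + headings, headings):
--         out += TURNS[(t - d) % 4] + ['straight']
--     return out
-- ===== Notes on version B (the rewrite author's own statement) =====
-- stated objective: alternative
-- what changed: Replaces A's single stateful loop with its count_cost 4x4 branch table by a three-stage pipeline: map consecutive pairs to direction indices, a scan that fills no-move steps with the previous heading, then a table-driven expansion of heading differences (mod 4) into turn/straight tokens.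
-- outside the precondition, e.g. on path_as_orders([], 0): A raises IndexError, B returns []
import Mathlib
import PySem

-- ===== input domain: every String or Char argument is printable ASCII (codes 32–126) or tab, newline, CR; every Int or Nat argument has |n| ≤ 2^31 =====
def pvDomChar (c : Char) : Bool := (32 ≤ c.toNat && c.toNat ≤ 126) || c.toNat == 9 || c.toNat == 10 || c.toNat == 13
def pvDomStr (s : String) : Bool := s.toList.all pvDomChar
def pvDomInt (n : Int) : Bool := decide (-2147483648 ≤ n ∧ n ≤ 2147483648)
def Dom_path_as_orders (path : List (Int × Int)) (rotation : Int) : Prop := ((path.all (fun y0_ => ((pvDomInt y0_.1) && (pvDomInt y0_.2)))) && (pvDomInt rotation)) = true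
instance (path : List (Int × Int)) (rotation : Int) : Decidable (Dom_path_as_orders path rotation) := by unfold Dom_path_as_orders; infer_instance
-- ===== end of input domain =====

-- B replaces A's single stateful loop (count_cost branch table) by a three-stage
-- pipeline: pairwise direction map, heading-fill scan, table-driven expansion.

-- ===== PORT A =====
def count_cost (start goal : Int × Int) (state : String) : String × Int :=
  let (x, y) := start
  let (x_next, y_next) := goal
  if state = "up" then
    if y_next < y then (state, 0)
    else if y_next > y then ("down", 2)
    else if x_next < x then ("left", -1)
    else if x_next > x then ("right", 1)
    else (state, 0)
  else if state = "right" then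
    if y_next < y then ("up", -1)
    else if y_next > y then ("down", 1)
    else if x_next < x then ("left", 2)
    else if x_next > x then (state, 0)
    else (state, 0)
  else if state = "down" then
    if y_next < y then ("up", 2)
    else if y_next > y then (state, 0)
    else if x_next < x then ("left", 1)
    else if x_next > x then ("right", -1)
    else (state, 0)
  else if state = "left" then
    if y_next < y then ("up", 1)
    else if y_next > y then ("down", -1)
    else if x_next < x then (state, 0)
    else if x_next > x then ("right", 2)
    else (state, 0)
  else (state, 0)

-- the per-iteration append block  "if cost == -1: … elif cost > 0: …"  of A's loop
def pvEmitA (cost : Int) : List String :=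
  if cost = -1 then ["turn left"]
  else if cost > 0 then List.replicate cost.toNat "turn right"
  else []

-- the for-loop of path_as_orders (output built by the same appends, front to back)
def pvLoopA : List (Int × Int) → String → Int → Int → List String
  | [], _, _, _ => []
  | (x, y) :: rest, state, x_prev, y_prev =>
    let sc := count_cost (x_prev, y_prev) (x, y) state
    pvEmitA sc.2 ++ ["straight"] ++ pvLoopA rest sc.1 x y

def path_as_orders (path : List (Int × Int)) (rotation : Int) : List String :=
  match path with
  | [] => []  -- Python raises IndexError on path[0]; excluded by Pre_
  | (x0, y0) :: rest => pvLoopA rest "up" x0 y0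

-- ===== PORT B =====
-- Source B's step_direction
def step_direction (p q : Int × Int) : Option Int :=
  if q.2 < p.2 then some 0
  else if q.2 > p.2 then some 2
  else if q.1 < p.1 then some 3
  else if q.1 > p.1 then some 1
  else none

-- the TURNS dict literal; lookup TURNS[k] with k = (t-d) % 4 ∈ {0,1,2,3} always hits
def pvTurns (k : Int) : List String :=
  if k = 0 then []
  else if k = 1 then ["turn right"]
  else if k = 2 then ["turn right", "turn right"]
  else ["turn left"]

-- Source B's heading-fill scan:  h = h if t is None else t; headings.append(h)
def pvFill : List (Option Int) → Int → List Int
  | [], _ => []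
  | t :: ts, h => let h' := t.getD h; h' :: pvFill ts h'

def path_as_orders_alt (path : List (Int × Int)) (rotation : Int) : List String :=
  let raw := (path.zip path.tail).map (fun pq => step_direction pq.1 pq.2)
  let headings := pvFill raw 0
  (((0 : Int) :: headings).zip headings).foldl
    (fun out dt => out ++ pvTurns (PySem.Int.mod (dt.2 - dt.1) 4) ++ ["straight"]) []

-- ===== PRECONDITION & SPEC =====
-- A raises IndexError at path[0] on an empty path; Pre_ excludes exactly that input.
def Pre_path_as_orders (path : List (Int × Int)) (rotation : Int) : Prop := path ≠ []
instance (path : List (Int × Int)) (rotation : Int) : Decidable (Pre_path_as_orders path rotation) := by unfold Pre_path_as_orders; infer_instance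
def pvWitness_path_as_orders : (List (Int × Int)) × Int := ([(0, 0), (0, 1), (1, 1)], 0)

def Spec_path_as_orders (path : List (Int × Int)) (rotation : Int) (out : List String) : Prop := out = path_as_orders_alt path rotation
instance (path : List (Int × Int)) (rotation : Int) (out : List String) : Decidable (Spec_path_as_orders path rotation out) := by unfold Spec_path_as_orders; infer_instance

-- ===== CLAIM (what is proved, stated in full; the proofs are below) =====
def Claim_equal_path_as_orders : Prop := ∀ (path : List (Int × Int)) (rotation : Int), Dom_path_as_orders path rotation → Pre_path_as_orders path rotation → Spec_path_as_orders path rotation (path_as_orders path rotation)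
-- ===== LEMMAS AND PROOFS =====

-- recursive reading of B's final expansion loop
def pvExpand : List (Int × Int) → List String
  | [] => []
  | dt :: ps => pvTurns (PySem.Int.mod (dt.2 - dt.1) 4) ++ ["straight"] ++ pvExpand ps

theorem pv_foldl_expand (pairs : List (Int × Int)) :
    ∀ acc : List String,
      pairs.foldl (fun out dt => out ++ pvTurns (PySem.Int.mod (dt.2 - dt.1) 4) ++ ["straight"]) acc
        = acc ++ pvExpand pairs := by
  induction pairs with
  | nil => intro acc; simp [pvExpand]
  | cons dt ps ih =>
    intro acc
    rw [List.foldl_cons, ih]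
    simp [pvExpand, List.append_assoc]

-- recursive reading of B's whole pipeline
def pvPipe : List (Int × Int) → Int → (Int × Int) → List String
  | [], _, _ => []
  | q :: rs, d, p =>
    let t := (step_direction p q).getD d
    pvTurns (PySem.Int.mod (t - d) 4) ++ ["straight"] ++ pvPipe rs t q

theorem pv_pipe_char : ∀ (rest : List (Int × Int)) (p : Int × Int) (d : Int),
    pvExpand ((d :: pvFill (((p :: rest).zip rest).map (fun pq => step_direction pq.1 pq.2)) d).zip
                (pvFill (((p :: rest).zip rest).map (fun pq => step_direction pq.1 pq.2)) d))
      = pvPipe rest d p := by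
  intro rest
  induction rest with
  | nil => intro p d; rfl
  | cons q rs ih =>
    intro p d
    simp only [List.zip_cons_cons, List.map_cons, pvFill, pvExpand, pvPipe]
    rw [ih q ((step_direction p q).getD d)]

-- correspondence between A's string state and B's heading index
def pvRel (s : String) (d : Int) : Prop :=
  (s = "up" ∧ d = 0) ∨ (s = "right" ∧ d = 1) ∨ (s = "down" ∧ d = 2) ∨ (s = "left" ∧ d = 3)

theorem pv_step_emit (s : String) (d px py x y : Int) (h : pvRel s d) :
    pvEmitA ((count_cost (px, py) (x, y) s).2)
      = pvTurns (PySem.Int.mod ((step_direction (px, py) (x, y)).getD d - d) 4) := by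
  rcases h with ⟨hs, hd⟩ | ⟨hs, hd⟩ | ⟨hs, hd⟩ | ⟨hs, hd⟩ <;> subst hs <;> subst hd <;>
    simp only [count_cost, step_direction, String.reduceEq, reduceIte] <;>
    split_ifs <;> decide

theorem pv_step_rel (s : String) (d px py x y : Int) (h : pvRel s d) :
    pvRel ((count_cost (px, py) (x, y) s).1) ((step_direction (px, py) (x, y)).getD d) := by
  rcases h with ⟨hs, hd⟩ | ⟨hs, hd⟩ | ⟨hs, hd⟩ | ⟨hs, hd⟩ <;> subst hs <;> subst hd <;>
    simp only [count_cost, step_direction, String.reduceEq, reduceIte] <;>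
    split_ifs <;> simp [pvRel]

theorem pv_loop_eq (rest : List (Int × Int)) :
    ∀ (s : String) (d : Int), pvRel s d →
      ∀ (px py : Int), pvLoopA rest s px py = pvPipe rest d (px, py) := by
  induction rest with
  | nil => intro s d _ px py; rfl
  | cons q rs ih =>
    intro s d hrel px py
    obtain ⟨x, y⟩ := q
    simp only [pvLoopA, pvPipe]
    rw [pv_step_emit s d px py x y hrel,
        ih _ _ (pv_step_rel s d px py x y hrel) x y]

-- ===== VERDICT (by name: the statements are the Claim_ definitions above) =====
theorem path_as_orders_spec : Claim_equal_path_as_orders := by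
  intro path rotation _ hpre
  unfold Spec_path_as_orders path_as_orders path_as_orders_alt
  match path with
  | [] => exact absurd rfl hpre
  | (x0, y0) :: rest =>
    simp only [List.tail_cons]
    rw [pv_foldl_expand, List.nil_append, pv_pipe_char rest (x0, y0) 0]
    exact pv_loop_eq rest "up" 0 (Or.inl ⟨rfl, rfl⟩) x0 y0
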